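-- pv_equiv track=rewrite | github.com/KTD-RYAN-SOUSA/kartado-changelog | helpers/extra_hours.py | _split_day_night_minutes
-- ===== SOURCE A (Python) =====
-- NIGHT_START_MINUTES = 22 * 60  # 22:00
--
-- NIGHT_END_MINUTES = 5 * 60  # 05:00
--
-- def _is_night_minute(minute):
--     """Checks if a normalized minute (0-1439) falls in the night period (22:00-05:00)."""
--     norm = minute % (24 * 60)
--     return norm >= NIGHT_START_MINUTES or norm < NIGHT_END_MINUTES
--
-- def _split_day_night_minutes(start_mins, end_mins):
--     """Splits a time range into day and night minutes."""
--     if start_mins is None or end_mins is None: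
--         return 0, 0
--
--     if end_mins <= start_mins:
--         end_mins += 24 * 60
--
--     day_mins = 0
--     night_mins = 0
--     for m in range(start_mins, end_mins):
--         if _is_night_minute(m):
--             night_mins += 1
--         else:
--             day_mins += 1
--
--     return day_mins, night_mins
-- ===== SOURCE B (Python) =====
-- NIGHT_START_MINUTES = 22 * 60  # 22:00
--
-- NIGHT_END_MINUTES = 5 * 60  # 05:00
--
-- def _night_minutes_below(x):
--     """Number of integers m < x (m >= any multiple of a day below) ... closed-form prefix count:
--     counts m in [0, x) (extended periodically to negatives) whose shifted value falls in the
--     7-hour night window.  Uses the shift m -> m + 2*60 so the night block [22:00,24:00)+[0,5:00)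
--     becomes the single block [0, 7*60) of the shifted day."""
--     y = x + (24 * 60 - NIGHT_START_MINUTES)  # shift by 120 minutes
--     night_len = 24 * 60 - NIGHT_START_MINUTES + NIGHT_END_MINUTES  # 420
--     return (y // (24 * 60)) * night_len + min(y % (24 * 60), night_len)
--
-- def _split_day_night_minutes(start_mins, end_mins):
--     """Splits a time range into day and night minutes (closed form, O(1))."""
--     if start_mins is None or end_mins is None:
--         return 0, 0
--     if end_mins <= start_mins:
--         end_mins += 24 * 60
--     total = end_mins - start_mins
--     if total <= 0:
--         return 0, 0
--     night = _night_minutes_below(end_mins) - _night_minutes_below(start_mins)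
--     return total - night, night
-- ===== Notes on version B (the rewrite author's own statement) =====
-- stated objective: faster
-- what changed: Replaced the minute-by-minute counting loop with a closed-form prefix count of night minutes (shift the night window to one block, count via floordiv/mod of the two endpoints), so night = f(end)-f(start); intended as faster on long ranges (a timing run measured 45.5x median at the largest size but inconsistent across inputs, many of which are short ranges).
import Mathlib
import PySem

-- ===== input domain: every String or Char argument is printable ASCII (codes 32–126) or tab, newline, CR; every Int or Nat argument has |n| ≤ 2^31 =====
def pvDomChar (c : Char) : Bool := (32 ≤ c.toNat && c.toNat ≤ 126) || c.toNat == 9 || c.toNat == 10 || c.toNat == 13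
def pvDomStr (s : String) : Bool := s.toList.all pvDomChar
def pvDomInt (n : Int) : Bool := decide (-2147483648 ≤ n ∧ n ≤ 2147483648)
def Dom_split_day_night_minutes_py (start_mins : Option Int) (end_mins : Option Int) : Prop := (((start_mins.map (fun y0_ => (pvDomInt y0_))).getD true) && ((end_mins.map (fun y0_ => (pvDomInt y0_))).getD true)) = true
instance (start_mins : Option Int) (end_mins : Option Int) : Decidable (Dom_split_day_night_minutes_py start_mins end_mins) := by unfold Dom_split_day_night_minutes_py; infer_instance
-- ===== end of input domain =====

-- B replaces A's minute-by-minute counting loop with a closed-form periodic prefix count of night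
-- minutes; intended as faster on long ranges (timing: 45.5x median at the largest size, but not
-- consistent across inputs since many generated ranges are short).

-- ===== PORT A =====
-- _is_night_minute
def pyIsNightMinute (minute : Int) : Bool :=
  let norm := PySem.Int.mod minute (24 * 60)
  decide (norm ≥ 22 * 60) || decide (norm < 5 * 60)

-- literal port of A: adjust end, then count each minute of range(start, end)
def split_day_night_minutes_py (start_mins : Option Int) (end_mins : Option Int) : List Int :=
  match start_mins, end_mins with
  | some s, some e0 =>
    let e := if e0 ≤ s then e0 + 24 * 60 else e0
    let p := (PySem.List.pyRange s e 1).foldl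
      (fun (acc : Int × Int) m =>
        if pyIsNightMinute m then (acc.1, acc.2 + 1) else (acc.1 + 1, acc.2)) (0, 0)
    [p.1, p.2]
  | _, _ => [0, 0]

-- ===== PORT B =====
-- _night_minutes_below: closed-form count of night minutes below x (periodic prefix count)
def nightMinutesBelow (x : Int) : Int :=
  let y := x + (24 * 60 - 22 * 60)
  let nightLen := 24 * 60 - 22 * 60 + 5 * 60
  PySem.Int.floordiv y (24 * 60) * nightLen + min (PySem.Int.mod y (24 * 60)) nightLen

def split_day_night_minutes_py_alt (start_mins : Option Int) (end_mins : Option Int) : List Int :=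
  match start_mins with
  | none => [0, 0]
  | some s =>
    match end_mins with
    | none => [0, 0]
    | some e0 =>
      let e := if e0 ≤ s then e0 + 24 * 60 else e0
      let total := e - s
      if total ≤ 0 then [0, 0]
      else
        let night := nightMinutesBelow e - nightMinutesBelow s
        [total - night, night]

-- ===== PRECONDITION & SPEC =====
def Spec_split_day_night_minutes_py (start_mins : Option Int) (end_mins : Option Int) (out : List Int) : Prop := out = split_day_night_minutes_py_alt start_mins end_mins
instance (start_mins : Option Int) (end_mins : Option Int) (out : List Int) : Decidable (Spec_split_day_night_minutes_py start_mins end_mins out) := by unfold Spec_split_day_night_minutes_py; infer_instance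

-- ===== CLAIM (what is proved, stated in full; the proofs are below) =====
def Claim_equal_split_day_night_minutes_py : Prop := ∀ (start_mins : Option Int) (end_mins : Option Int), Dom_split_day_night_minutes_py start_mins end_mins → Spec_split_day_night_minutes_py start_mins end_mins (split_day_night_minutes_py start_mins end_mins)

-- ===== LEMMAS AND PROOFS =====

-- the prefix count steps by exactly the night indicator
lemma nightMinutesBelow_succ (x : Int) :
    nightMinutesBelow (x + 1) = nightMinutesBelow x + (if pyIsNightMinute x then 1 else 0) := by
  simp only [nightMinutesBelow, pyIsNightMinute,
    PySem.Int.floordiv_eq_ediv_of_pos (by norm_num : (0:Int) < 24 * 60),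
    PySem.Int.mod_eq_emod_of_pos (by norm_num : (0:Int) < 24 * 60), min_def, Bool.or_eq_true, decide_eq_true_eq, ge_iff_le]
  split_ifs <;> omega

-- A's loop over [s, s+n) computed in closed form
lemma loop_closed (s : Int) : ∀ n : Nat,
    (PySem.List.pyRange s (s + n) 1).foldl
      (fun (acc : Int × Int) m =>
        if pyIsNightMinute m then (acc.1, acc.2 + 1) else (acc.1 + 1, acc.2)) (0, 0)
    = ((n : Int) - (nightMinutesBelow (s + n) - nightMinutesBelow s),
       nightMinutesBelow (s + n) - nightMinutesBelow s) := by
  intro n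
  induction n with
  | zero => simp [PySem.List.pyRange_one_eq_nil (le_refl s)]
  | succ k ih =>
    have hsplit : PySem.List.pyRange s (s + (k + 1 : Nat)) 1
        = PySem.List.pyRange s (s + k) 1 ++ [s + k] := by
      have : (s + (k + 1 : Nat)) = (s + k) + 1 := by push_cast; ring
      rw [this, PySem.List.pyRange_one_succ_right (by omega : s ≤ s + (k : Int))]
    rw [hsplit, List.foldl_append, ih]
    have hstep := nightMinutesBelow_succ (s + k)
    have : (s + ((k : Int) + 1)) = (s + k) + 1 := by ring
    push_cast
    rw [this, hstep]
    by_cases h : pyIsNightMinute (s + (k:Int)) = true <;>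
      simp [h, Prod.ext_iff] <;> first | (constructor <;> ring) | ring

-- ===== VERDICT (by name: the statement is the Claim_ definition above) =====
theorem split_day_night_minutes_py_spec : Claim_equal_split_day_night_minutes_py := by
  intro start_mins end_mins _
  unfold Spec_split_day_night_minutes_py split_day_night_minutes_py split_day_night_minutes_py_alt
  match start_mins, end_mins with
  | none, none => rfl
  | none, some _ => rfl
  | some s, none => rfl
  | some s, some e0 =>
    simp only
    set e := if e0 ≤ s then e0 + 24 * 60 else e0 with he
    by_cases h : e - s ≤ 0
    · rw [if_pos h, PySem.List.pyRange_one_eq_nil (by omega : e ≤ s)]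
      rfl
    · rw [if_neg h]
      have hn : e = s + ((e - s).toNat : Int) := by omega
      rw [hn, loop_closed s (e - s).toNat]
      simp only
      simp only [List.cons.injEq, and_true]
      omega
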